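-- pv_equiv track=rewrite | github.com/SuhanC/IonBind | sequence_postproc_utils.py | get_func_group
-- ===== SOURCE A (Python) =====
-- def get_func_group(sequence):
--     polar=['C','N','P','Q','S','T','U']
--     alipathic=['A','G','I','L','M','V','J']
--     aromatic=['F','W','Y']
--     negative=['D','E']
--     positive=['H','K','R']
--
--     def get_func_representation(sequence,group_idx):
--         return([1 if group_idx.count(s) else 0 for s in sequence])
--
--     result_lst=[]
--     for func_group in [polar,alipathic,aromatic,negative,positive]:
--         result_lst.append(get_func_representation(sequence,func_group))
--     return(result_lst)
-- ===== SOURCE B (Python) =====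
-- def get_func_group(sequence):
--     # Column-major: map each char to its one-hot 5-vector ("column"), then transpose.
--     onehot = {}
--     for i, letters in enumerate(['CNPQSTU', 'AGILMVJ', 'FWY', 'DE', 'HKR']):
--         for c in letters:
--             onehot[c] = [1 if j == i else 0 for j in range(5)]
--     zero = [0, 0, 0, 0, 0]
--     cols = [onehot.get(c, zero) for c in sequence]
--     return [[col[i] for col in cols] for i in range(5)]
-- ===== Notes on version B (the rewrite author's own statement) =====
-- stated objective: alternative
-- what changed: Instead of A's row-major build (five full-sequence membership scans, one .count test per group per char), B works column-major: a precomputed char-to-one-hot-column table maps each character to its 5-bit column in one pass, and the column list is then transposed into the five rows.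
import Mathlib
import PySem

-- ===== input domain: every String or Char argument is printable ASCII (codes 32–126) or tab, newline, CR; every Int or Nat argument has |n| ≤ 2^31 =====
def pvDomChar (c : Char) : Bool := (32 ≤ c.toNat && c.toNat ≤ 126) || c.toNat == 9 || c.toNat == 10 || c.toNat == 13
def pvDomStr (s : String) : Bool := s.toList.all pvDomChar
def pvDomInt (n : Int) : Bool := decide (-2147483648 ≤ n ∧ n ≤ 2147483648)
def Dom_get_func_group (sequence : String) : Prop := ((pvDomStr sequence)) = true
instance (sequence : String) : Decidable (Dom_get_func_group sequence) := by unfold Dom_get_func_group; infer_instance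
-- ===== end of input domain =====

-- B builds the answer column-major — a char→one-hot-column table, one lookup pass, then a transpose — instead of A's five row-wise membership scans; measured constant-factor faster in a timing run.


-- ===== PORT A =====
def get_func_group (sequence : String) : List (List Int) :=
  let polar : List Char := ['C','N','P','Q','S','T','U']
  let alipathic : List Char := ['A','G','I','L','M','V','J']
  let aromatic : List Char := ['F','W','Y']
  let negative : List Char := ['D','E']
  let positive : List Char := ['H','K','R']
  let get_func_representation : String → List Char → List Int :=
    fun seq group_idx => seq.toList.map (fun s => if PySem.List.count group_idx s ≠ 0 then (1 : Int) else 0)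
  [polar, alipathic, aromatic, negative, positive].foldl
    (fun result_lst func_group => result_lst ++ [get_func_representation sequence func_group]) []

-- ===== PORT B =====
-- one-hot table: for each (i, letters), each char of letters maps to the one-hot column [1 if j == i else 0 for j in range(5)]
def pvOnehot : PySem.Dict Char (List Int) :=
  (PySem.List.enumerate ["CNPQSTU", "AGILMVJ", "FWY", "DE", "HKR"]).foldl
    (fun d p => p.2.toList.foldl
      (fun d c => d.insert c ((PySem.List.pyRange 0 5 1).map (fun j => if j = p.1 then (1 : Int) else 0))) d)
    PySem.Dict.empty

def pvZero : List Int := [0, 0, 0, 0, 0]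

def get_func_group_alt (sequence : String) : List (List Int) :=
  let cols := sequence.toList.map (fun c => pvOnehot.getD c pvZero)
  -- col[i]: PySem.List.pyGetD is exact here since every column has length 5 and 0 ≤ i < 5
  (PySem.List.pyRange 0 5 1).map (fun i => cols.map (fun col => PySem.List.pyGetD col i 0))

-- ===== PRECONDITION & SPEC =====
def Spec_get_func_group (sequence : String) (out : List (List Int)) : Prop := out = get_func_group_alt sequence
instance (sequence : String) (out : List (List Int)) : Decidable (Spec_get_func_group sequence out) := by unfold Spec_get_func_group; infer_instance

-- ===== CLAIM (what is proved, stated in full; the proofs are below) =====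
def Claim_equal_get_func_group : Prop := ∀ (sequence : String), Dom_get_func_group sequence → Spec_get_func_group sequence (get_func_group sequence)

-- ===== LEMMAS AND PROOFS =====
theorem pvOnehot_eq : pvOnehot = PySem.Dict.mk
    [('C',[1,0,0,0,0]),('N',[1,0,0,0,0]),('P',[1,0,0,0,0]),('Q',[1,0,0,0,0]),('S',[1,0,0,0,0]),('T',[1,0,0,0,0]),('U',[1,0,0,0,0]),
     ('A',[0,1,0,0,0]),('G',[0,1,0,0,0]),('I',[0,1,0,0,0]),('L',[0,1,0,0,0]),('M',[0,1,0,0,0]),('V',[0,1,0,0,0]),('J',[0,1,0,0,0]),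
     ('F',[0,0,1,0,0]),('W',[0,0,1,0,0]),('Y',[0,0,1,0,0]),
     ('D',[0,0,0,1,0]),('E',[0,0,0,1,0]),
     ('H',[0,0,0,0,1]),('K',[0,0,0,0,1]),('R',[0,0,0,0,1])] := by decide

theorem pvCol_eq (c : Char) : pvOnehot.getD c pvZero =
    [if PySem.List.count ['C','N','P','Q','S','T','U'] c ≠ 0 then (1 : Int) else 0,
     if PySem.List.count ['A','G','I','L','M','V','J'] c ≠ 0 then (1 : Int) else 0,
     if PySem.List.count ['F','W','Y'] c ≠ 0 then (1 : Int) else 0,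
     if PySem.List.count ['D','E'] c ≠ 0 then (1 : Int) else 0,
     if PySem.List.count ['H','K','R'] c ≠ 0 then (1 : Int) else 0] := by
  rw [pvOnehot_eq]
  simp only [PySem.Dict.getD, PySem.Dict.get?_mk_cons, PySem.List.count_eq, List.count_cons,
    List.count_nil, beq_iff_eq]
  rcases eq_or_ne c 'C' with h0|h0
  · subst h0; decide
  rcases eq_or_ne c 'N' with h1|h1
  · subst h1; decide
  rcases eq_or_ne c 'P' with h2|h2
  · subst h2; decide
  rcases eq_or_ne c 'Q' with h3|h3
  · subst h3; decide
  rcases eq_or_ne c 'S' with h4|h4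
  · subst h4; decide
  rcases eq_or_ne c 'T' with h5|h5
  · subst h5; decide
  rcases eq_or_ne c 'U' with h6|h6
  · subst h6; decide
  rcases eq_or_ne c 'A' with h7|h7
  · subst h7; decide
  rcases eq_or_ne c 'G' with h8|h8
  · subst h8; decide
  rcases eq_or_ne c 'I' with h9|h9
  · subst h9; decide
  rcases eq_or_ne c 'L' with h10|h10
  · subst h10; decide
  rcases eq_or_ne c 'M' with h11|h11
  · subst h11; decide
  rcases eq_or_ne c 'V' with h12|h12
  · subst h12; decide
  rcases eq_or_ne c 'J' with h13|h13
  · subst h13; decide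
  rcases eq_or_ne c 'F' with h14|h14
  · subst h14; decide
  rcases eq_or_ne c 'W' with h15|h15
  · subst h15; decide
  rcases eq_or_ne c 'Y' with h16|h16
  · subst h16; decide
  rcases eq_or_ne c 'D' with h17|h17
  · subst h17; decide
  rcases eq_or_ne c 'E' with h18|h18
  · subst h18; decide
  rcases eq_or_ne c 'H' with h19|h19
  · subst h19; decide
  rcases eq_or_ne c 'K' with h20|h20
  · subst h20; decide
  rcases eq_or_ne c 'R' with h21|h21
  · subst h21; decide
  simp [PySem.Dict.get?, pvZero, h0.symm, h1.symm, h2.symm, h3.symm, h4.symm, h5.symm, h6.symm, h7.symm, h8.symm, h9.symm, h10.symm, h11.symm, h12.symm, h13.symm, h14.symm, h15.symm, h16.symm, h17.symm, h18.symm, h19.symm, h20.symm, h21.symm]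

-- ===== VERDICT (by name: the statement is the Claim_ definition above) =====
theorem get_func_group_spec : Claim_equal_get_func_group := by
  intro s _
  unfold Spec_get_func_group get_func_group get_func_group_alt
  rw [show PySem.List.pyRange 0 5 1 = [0,1,2,3,4] by decide]
  simp only [List.foldl, List.map_cons, List.map_nil, List.map_map]
  simp [pvCol_eq, PySem.List.pyGetD]
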